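-- pv_equiv track=rewrite | github.com/EmmanuelVankerkore/TempsLibre | TP/MessageCode/Main.py | reconstituer_message
-- ===== SOURCE A (Python) =====
-- def trouver_valeur_cle_maximal(dictionnaire):
--     valeur_max = 0
--     for cle in list(dictionnaire.keys()):
--         if cle > valeur_max:
--             valeur_max = cle
--     return valeur_max
--
-- def reconstituer_message(dictionnaire_message_explose):
--     message = ''
--     liste_keys = list(dictionnaire_message_explose.keys())
--     for i in range(0, trouver_valeur_cle_maximal(dictionnaire_message_explose)+1):
--         if i in liste_keys:
--             message = message + dictionnaire_message_explose[i]
--         else: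
--             message = message + ' '
--     return message
-- ===== SOURCE B (Python) =====
-- def trouver_valeur_cle_maximal(dictionnaire):
--     valeur_max = 0
--     for cle in list(dictionnaire.keys()):
--         if cle > valeur_max:
--             valeur_max = cle
--     return valeur_max
--
-- def reconstituer_message(dictionnaire_message_explose):
--     valeur_max = trouver_valeur_cle_maximal(dictionnaire_message_explose)
--     resultat = [' '] * (valeur_max + 1)
--     for cle, valeur in dictionnaire_message_explose.items():
--         if 0 <= cle <= valeur_max:
--             resultat[cle] = valeur
--     return ''.join(resultat)
-- ===== Notes on version B (the rewrite author's own statement) =====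
-- stated objective: faster
-- what changed: Instead of scanning 0..max and testing 'i in liste_keys' (a linear scan of the key list per position), B pre-fills a list of spaces of length max+1 and does one scatter pass over the dict items, assigning result[k]=v for keys in range, then joins.
import Mathlib
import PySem

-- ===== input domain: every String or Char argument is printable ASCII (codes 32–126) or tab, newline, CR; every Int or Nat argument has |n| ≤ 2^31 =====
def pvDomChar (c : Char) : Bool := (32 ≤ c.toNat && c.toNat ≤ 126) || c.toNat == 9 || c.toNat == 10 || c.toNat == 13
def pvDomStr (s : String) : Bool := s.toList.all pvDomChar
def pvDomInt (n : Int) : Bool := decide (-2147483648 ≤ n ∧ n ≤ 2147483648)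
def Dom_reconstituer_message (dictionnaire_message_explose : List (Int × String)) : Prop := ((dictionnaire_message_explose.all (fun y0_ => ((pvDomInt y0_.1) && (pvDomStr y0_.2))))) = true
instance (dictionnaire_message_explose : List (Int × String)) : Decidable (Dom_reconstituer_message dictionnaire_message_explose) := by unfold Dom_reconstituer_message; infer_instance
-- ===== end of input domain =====

-- B replaces A's per-position scan of the key list by a pre-filled table of spaces plus one
-- scatter pass over the dict items (objective: faster — O(max+len) instead of O(max*len)).

-- ===== PORT A =====
def trouver_valeur_cle_maximal (dictionnaire : List (Int × String)) : Int :=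
  (PySem.Dict.mk dictionnaire).keys.foldl (fun valeur_max cle => if cle > valeur_max then cle else valeur_max) 0

def reconstituer_message (dictionnaire_message_explose : List (Int × String)) : String :=
  let liste_keys := (PySem.Dict.mk dictionnaire_message_explose).keys
  (PySem.List.pyRange 0 (trouver_valeur_cle_maximal dictionnaire_message_explose + 1) 1).foldl
    (fun message i =>
      if liste_keys.contains i then
        message ++ (PySem.Dict.getD (PySem.Dict.mk dictionnaire_message_explose) i "")
      else
        message ++ " ") ""

-- ===== PORT B =====
def pvMaxCle (dictionnaire : List (Int × String)) : Int :=
  (PySem.Dict.mk dictionnaire).keys.foldl (fun valeur_max cle => if cle > valeur_max then cle else valeur_max) 0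

def reconstituer_message_alt (dictionnaire_message_explose : List (Int × String)) : String :=
  let valeur_max := pvMaxCle dictionnaire_message_explose
  let resultat := PySem.List.pyRepeat [" "] (valeur_max + 1)
  let resultat := ((PySem.Dict.mk dictionnaire_message_explose).items).foldl
    (fun r kv => if 0 ≤ kv.1 ∧ kv.1 ≤ valeur_max then PySem.List.pySetD r kv.1 kv.2 else r) resultat
  String.join resultat

-- ===== PRECONDITION & SPEC =====
-- Pre_ excludes association lists with duplicate keys: those do not represent a Python dict
-- (a dict has unique keys), and on them A's port reads the first binding while B's scatter
-- keeps the last — an artefact of the association-list encoding, not of either Python program.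
def Pre_reconstituer_message (dictionnaire_message_explose : List (Int × String)) : Prop :=
  (dictionnaire_message_explose.map Prod.fst).Nodup
instance (dictionnaire_message_explose : List (Int × String)) : Decidable (Pre_reconstituer_message dictionnaire_message_explose) := by unfold Pre_reconstituer_message; infer_instance

def pvWitness_reconstituer_message : (List (Int × String)) := [(0, "a"), (2, "b"), (-1, "z")]

def Spec_reconstituer_message (dictionnaire_message_explose : List (Int × String)) (out : String) : Prop := out = reconstituer_message_alt dictionnaire_message_explose
instance (dictionnaire_message_explose : List (Int × String)) (out : String) : Decidable (Spec_reconstituer_message dictionnaire_message_explose out) := by unfold Spec_reconstituer_message; infer_instance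

-- ===== CLAIM (what is proved, stated in full; the proofs are below) =====
def Claim_equal_reconstituer_message : Prop := ∀ (dictionnaire_message_explose : List (Int × String)), Dom_reconstituer_message dictionnaire_message_explose → Pre_reconstituer_message dictionnaire_message_explose → Spec_reconstituer_message dictionnaire_message_explose (reconstituer_message dictionnaire_message_explose)

-- ===== LEMMAS AND PROOFS =====

theorem pv_le_foldl_max (l : List Int) (init : Int) :
    init ≤ l.foldl (fun m k => if k > m then k else m) init := by
  induction l generalizing init with
  | nil => simp
  | cons k rest ih =>
      simp only [List.foldl_cons]
      by_cases h : k > init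
      · simp only [h, if_pos]
        exact le_trans (le_of_lt h) (ih k)
      · simp only [h, if_neg, not_false_iff]
        exact ih init

theorem pv_max_nonneg (d : List (Int × String)) : 0 ≤ pvMaxCle d := by
  unfold pvMaxCle
  exact pv_le_foldl_max _ 0

-- the value A writes at position i
def pvG (d : List (Int × String)) (i : Int) : String :=
  match PySem.Dict.get? (PySem.Dict.mk d) i with
  | some v => v
  | none => " "

theorem pv_body (d : List (Int × String)) (i : Int) :
    (if (PySem.Dict.mk d).keys.contains i then
        PySem.Dict.getD (PySem.Dict.mk d) i "" else " ") = pvG d i := by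
  unfold pvG
  cases h : PySem.Dict.get? (PySem.Dict.mk d) i with
  | none =>
      have hnm : i ∉ (PySem.Dict.mk d).keys :=
        (PySem.Dict.get?_eq_none_iff_not_mem_keys _ _).1 h
      have hc : (PySem.Dict.mk d).keys.contains i = false := by
        rw [List.contains_eq_mem]; simpa using hnm
      rw [hc]
      simp
  | some v =>
      have hm : i ∈ (PySem.Dict.mk d).keys := by
        by_contra hc
        rw [← PySem.Dict.get?_eq_none_iff_not_mem_keys] at hc
        simp [h] at hc
      have hc : (PySem.Dict.mk d).keys.contains i = true := by
        rw [List.contains_eq_mem]; simpa using hm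
      rw [hc]
      simp only [if_pos]
      rw [PySem.Dict.getD_eq_get?_getD, h]
      rfl

theorem pv_foldl_join (l : List Int) (g : Int → String) :
    l.foldl (fun m x => m ++ g x) "" = String.join (l.map g) := by
  simp [String.join, List.foldl_map]

theorem pv_A_join (d : List (Int × String)) :
    reconstituer_message d =
      String.join ((PySem.List.pyRange 0 (pvMaxCle d + 1) 1).map (pvG d)) := by
  unfold reconstituer_message
  have htr : trouver_valeur_cle_maximal d = pvMaxCle d := rfl
  rw [htr, ← pv_foldl_join]
  apply PySem.List.foldl_congr_mem
  intro m i _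
  rw [← pv_body d i]
  split_ifs with h <;> rfl

def pvScatter (m : Int) (d : List (Int × String)) (tbl : List String) : List String :=
  d.foldl (fun r kv => if 0 ≤ kv.1 ∧ kv.1 ≤ m then PySem.List.pySetD r kv.1 kv.2 else r) tbl

theorem pv_scatter_length (m : Int) (d : List (Int × String)) (tbl : List String) :
    (pvScatter m d tbl).length = tbl.length := by
  induction d generalizing tbl with
  | nil => rfl
  | cons kv rest ih =>
      unfold pvScatter
      simp only [List.foldl_cons]
      rw [show (rest.foldl (fun r kv => if 0 ≤ kv.1 ∧ kv.1 ≤ m then PySem.List.pySetD r kv.1 kv.2 else r) _) = pvScatter m rest _ from rfl, ih]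
      split <;> simp [PySem.List.length_pySetD]

theorem pv_scatter_get (m : Int) (d : List (Int × String)) : ∀ (tbl : List String) (i : Nat),
    (d.map Prod.fst).Nodup → i < tbl.length → (i : Int) ≤ m →
    (pvScatter m d tbl).getD i " " =
      match PySem.Dict.get? (PySem.Dict.mk d) i with
      | some v => v
      | none => tbl.getD i " " := by
  induction d with
  | nil => intro tbl i _ _ _; simp [pvScatter, PySem.Dict.get?]
  | cons kv rest ih =>
      intro tbl i hnd hi him
      obtain ⟨k, v⟩ := kv
      simp only [List.map_cons, List.nodup_cons] at hnd
      obtain ⟨hk, hrest⟩ := hnd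
      have hstep : pvScatter m ((k, v) :: rest) tbl =
          pvScatter m rest (if 0 ≤ k ∧ k ≤ m then PySem.List.pySetD tbl k v else tbl) := rfl
      have hlen : (if 0 ≤ k ∧ k ≤ m then PySem.List.pySetD tbl k v else tbl).length = tbl.length := by
        split <;> simp [PySem.List.length_pySetD]
      rw [hstep, ih _ i hrest (by rw [hlen]; exact hi) him, PySem.Dict.get?_mk_cons]
      by_cases hki : k = (i : Int)
      · -- key hits position i; rest cannot contain it
        have hguard : (0 ≤ k ∧ k ≤ m) := by constructor <;> omega
        have hrnone : PySem.Dict.get? (PySem.Dict.mk rest) (i : Int) = none := by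
          rw [PySem.Dict.get?_eq_none_iff_not_mem_keys, PySem.Dict.keys_mk]
          rw [hki] at hk; exact hk
        simp only [hki, hrnone, beq_self_eq_true, if_pos]
        rw [if_pos (⟨by omega, him⟩ : (0 : Int) ≤ (i : Int) ∧ (i : Int) ≤ m), PySem.List.pySetD_of_nonneg _ _ (by omega : (0 : Int) ≤ (i : Int))]
        have hti : ((i : Int)).toNat = i := by omega
        rw [hti, List.getD_eq_getElem _ _ (by simpa using hi), List.getElem_set_self]
      · -- different key: position i untouched
        have hne : (k == (i : Int)) = false := by simp [hki]
        rw [hne]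
        simp only [Bool.false_eq_true, if_false]
        have htbl : (if 0 ≤ k ∧ k ≤ m then PySem.List.pySetD tbl k v else tbl).getD i " " = tbl.getD i " " := by
          split
          · next hg =>
              rw [PySem.List.pySetD_of_nonneg _ _ hg.1]
              have hne2 : k.toNat ≠ i := by omega
              rw [List.getD_eq_getElem _ _ (by simp [hi]), List.getD_eq_getElem _ _ hi,
                List.getElem_set_ne hne2]
          · rfl
        rw [htbl]

theorem pv_B_join (d : List (Int × String)) (hnd : (d.map Prod.fst).Nodup) :
    reconstituer_message_alt d =
      String.join ((PySem.List.pyRange 0 (pvMaxCle d + 1) 1).map (pvG d)) := by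
  have hM := pv_max_nonneg d
  have hB : reconstituer_message_alt d =
      String.join (pvScatter (pvMaxCle d) d (List.replicate (pvMaxCle d + 1).toNat " ")) := by
    simp only [reconstituer_message_alt, PySem.List.pyRepeat_singleton]
    rfl
  rw [hB]
  congr 1
  have hlen1 : (pvScatter (pvMaxCle d) d (List.replicate (pvMaxCle d + 1).toNat " ")).length
      = (pvMaxCle d + 1).toNat := by
    rw [pv_scatter_length]; simp
  apply List.ext_getElem
  · rw [hlen1]; simp [PySem.List.pyRange_one]
  · intro i h1 h2
    have hin : i < (pvMaxCle d + 1).toNat := by rw [hlen1] at h1; exact h1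
    have him : (i : Int) ≤ pvMaxCle d := by omega
    rw [← List.getD_eq_getElem _ " " h1,
      pv_scatter_get (pvMaxCle d) d _ i hnd (by simpa using hin) him]
    simp only [PySem.List.pyRange_one, List.map_map, List.getElem_map, List.getElem_range,
      Function.comp, zero_add]
    unfold pvG
    cases hq : PySem.Dict.get? (PySem.Dict.mk d) (i : Int) with
    | some v => rfl
    | none =>
        rw [List.getD_eq_getElem _ _ (by simpa using hin), List.getElem_replicate]

-- ===== VERDICT (by name: the statement is the Claim_ definition above) =====
theorem reconstituer_message_spec : Claim_equal_reconstituer_message := by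
  intro d _ hpre
  unfold Spec_reconstituer_message
  rw [pv_A_join, pv_B_join d hpre]
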